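-- pv_equiv track=rewrite | github.com/bvanhoewijk/adventofcode | day08/day08.py | part2
-- ===== SOURCE A (Python) =====
-- def part2(i, dataset):
--     count = dataset[i]
--     meta = dataset[i + 1]
--     nodes = []
--     i += 2
--     result = 0
--     for _ in range(count):
--         tmp, tmp2 = part2(i, dataset)
--         i = tmp
--         nodes.append(tmp2)
--
--     for _ in range(meta):
--         if count == 0:
--             result += dataset[i]
--         elif len(nodes) > (dataset[i] - 1) and (dataset[1] - 1) >= 0:
--             result += nodes[dataset[i] - 1]
--         i += 1
--
--     return (i, result)
-- ===== SOURCE B (Python) =====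
-- def part2(i, dataset):
--     # Iterative reformulation: explicit stack of frames instead of recursion.
--     stack = []  # frames: [count, meta, children_left, child_values]
--     while True:
--         count = dataset[i]
--         meta = dataset[i + 1]
--         i += 2
--         stack.append([count, meta, count if count > 0 else 0, []])
--         while stack[-1][2] == 0:
--             count, meta, _, nodes = stack.pop()
--             result = 0
--             for _ in range(meta):
--                 if count == 0:
--                     result += dataset[i]
--                 elif len(nodes) > (dataset[i] - 1) and (dataset[1] - 1) >= 0:
--                     result += nodes[dataset[i] - 1]
--                 i += 1
--             if not stack:
--                 return (i, result)
--             stack[-1][2] -= 1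
--             stack[-1][3].append(result)
-- ===== Notes on version B (the rewrite author's own statement) =====
-- stated objective: alternative
-- what changed: Replaces A's recursive descent with an iterative parser driven by an explicit stack of frames (count, meta, children-left, collected child values), popping completed frames and delivering their metadata sum to the parent.
import Mathlib
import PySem

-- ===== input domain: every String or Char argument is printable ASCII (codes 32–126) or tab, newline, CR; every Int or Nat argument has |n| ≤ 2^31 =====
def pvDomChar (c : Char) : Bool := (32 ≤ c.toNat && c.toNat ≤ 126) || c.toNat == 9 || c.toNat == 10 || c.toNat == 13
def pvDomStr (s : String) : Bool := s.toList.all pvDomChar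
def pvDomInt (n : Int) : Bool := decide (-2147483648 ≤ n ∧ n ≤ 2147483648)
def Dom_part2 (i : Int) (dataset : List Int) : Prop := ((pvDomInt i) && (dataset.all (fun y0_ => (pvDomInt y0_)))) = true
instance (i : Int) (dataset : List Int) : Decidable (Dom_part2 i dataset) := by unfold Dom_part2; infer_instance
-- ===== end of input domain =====

-- B replaces A's recursion by an explicit stack machine of frames (same values, same cursor order); objective: alternative decomposition.

-- ===== PORT A =====
-- dataset[k] (Python indexing, negative wrap); outside Pre_ the default 0 is never relied on.
def pvGetD (xs : List Int) (k : Int) : Int := (PySem.List.pyGet? xs k).getD 0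

-- A's second for-loop: `for _ in range(mta)` accumulating result and advancing i.
def metaLoopA (dataset : List Int) (count : Int) (nodes : List Int) : Nat → Int → Int → Int × Int
  | 0, i, result => (i, result)
  | m+1, i, result =>
    let d := pvGetD dataset i
    let result' :=
      if count == 0 then result + d
      else if (nodes.length : Int) > d - 1 ∧ pvGetD dataset 1 - 1 ≥ 0 then
        result + pvGetD nodes (d - 1)
      else result
    metaLoopA dataset count nodes m (i + 1) result'

-- A's recursion, with fuel for totality; fuel (length+1) suffices on every input A returns on.
mutual
def part2Fuel (dataset : List Int) : Nat → Int → Int × Int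
  | 0, i => (i, 0)
  | f+1, i =>
    let count := pvGetD dataset i
    let mta := pvGetD dataset (i + 1)
    let r := childLoopA dataset f count.toNat (i + 2) []
    metaLoopA dataset count r.2 mta.toNat r.1 0
termination_by f _ => (f, 0)

-- A's first for-loop: `for _ in range(count)` recursing and appending to nodes.
def childLoopA (dataset : List Int) (f : Nat) : Nat → Int → List Int → Int × List Int
  | 0, i, nodes => (i, nodes)
  | c+1, i, nodes =>
    let r := part2Fuel dataset f i
    childLoopA dataset f c r.1 (nodes ++ [r.2])
termination_by c _ _ => (f, c + 1)
end

def part2 (i : Int) (dataset : List Int) : Int × Int := part2Fuel dataset (dataset.length + 1) i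

-- ===== PORT B =====
structure PvFrame where
  count : Int
  mta : Int
  remaining : Nat
  nodes : List Int
deriving Repr, DecidableEq

-- B's metadata loop as a fold over range(mta), from result = 0.
def metaFoldB (dataset : List Int) (count : Int) (nodes : List Int) (mta : Int) (i : Int) : Int × Int :=
  (List.range mta.toNat).foldl
    (fun (s : Int × Int) _ =>
      let d := pvGetD dataset s.1
      let r :=
        if count == 0 then s.2 + d
        else if (nodes.length : Int) > d - 1 ∧ pvGetD dataset 1 - 1 ≥ 0 then
          s.2 + pvGetD nodes (d - 1)
        else s.2
      (s.1 + 1, r)) (i, 0)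

-- B's inner `while stack[-1][2] == 0` loop: pop completed frames, deliver values upward;
-- .inr = function returned, .inl = machine state to continue parsing from.
def popLoop (dataset : List Int) : Int → List PvFrame → (Int × List PvFrame) ⊕ (Int × Int)
  | i, [] => Sum.inl (i, [])
  | i, fr :: rest =>
    if fr.remaining = 0 then
      let p := metaFoldB dataset fr.count fr.nodes fr.mta i
      match rest with
      | [] => Sum.inr p
      | g :: rs => popLoop dataset p.1 (⟨g.count, g.mta, g.remaining - 1, g.nodes ++ [p.2]⟩ :: rs)
    else Sum.inl (i, fr :: rest)
termination_by _ s => s.length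

-- B's outer `while True` loop: push a frame for the node at the cursor, then pop what completed.
def runB (dataset : List Int) : Nat → Int → List PvFrame → Int × Int
  | 0, i, _ => (i, 0)
  | fuel+1, i, stack =>
    let count := pvGetD dataset i
    let mta := pvGetD dataset (i + 1)
    match popLoop dataset (i + 2) (⟨count, mta, count.toNat, []⟩ :: stack) with
    | Sum.inr ans => ans
    | Sum.inl s' => runB dataset fuel s'.1 s'.2

def part2_alt (i : Int) (dataset : List Int) : Int × Int := runB dataset (dataset.length + 1) i []

-- ===== PRECONDITION & SPEC =====
-- Grammar check for the tree A parses: okNode returns (end cursor, node count) iff A's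
-- recursion at that cursor returns without an IndexError; it computes no metadata values.
def okMeta (dataset : List Int) (count : Int) (nnodes : Nat) : Nat → Int → Bool
  | 0, _ => true
  | m+1, i =>
    match PySem.List.pyGet? dataset i with
    | none => false
    | some d =>
      (if count == 0 then true
       else if (nnodes : Int) > d - 1 then
         match PySem.List.pyGet? dataset 1 with
         | none => false
         | some d1 => if d1 - 1 ≥ 0 then decide (-(nnodes : Int) ≤ d - 1) else true
       else true) && okMeta dataset count nnodes m (i + 1)

-- children check: run the node check g on c consecutive children, threading the cursor
-- and summing node counts.
def okChildrenAux (g : Int → Option (Int × Nat)) : Nat → Int → Option (Int × Nat)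
  | 0, i => some (i, 0)
  | c+1, i =>
    (g i).bind fun r =>
    (okChildrenAux g c r.1).bind fun r2 =>
    some (r2.1, r.2 + r2.2)

def okNode (dataset : List Int) : Nat → Int → Option (Int × Nat)
  | 0, _ => none
  | f+1, i =>
    (PySem.List.pyGet? dataset i).bind fun count =>
    (PySem.List.pyGet? dataset (i + 1)).bind fun mta =>
    (okChildrenAux (okNode dataset f) count.toNat (i + 2)).bind fun r =>
    if okMeta dataset count count.toNat mta.toNat r.1 then
      some (r.1 + (mta.toNat : Int), r.2 + 1)
    else none

-- Pre_: exactly the inputs on which the Python part2 returns (dataset encodes one well-formed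
-- node at i whose metadata accesses are all in range); the node-count bound is always true
-- (each node occupies ≥ 2 cursor positions) and only feeds the fuel of the two ports.
def Pre_part2 (i : Int) (dataset : List Int) : Prop :=
  (okNode dataset (dataset.length + 1) i).any (fun r => r.2 ≤ dataset.length + 1) = true
instance (i : Int) (dataset : List Int) : Decidable (Pre_part2 i dataset) := by
  unfold Pre_part2; infer_instance

def pvWitness_part2 : Int × List Int := (0, [1, 2, 0, 1, 7, 1, 1])

def Spec_part2 (i : Int) (dataset : List Int) (out : Int × Int) : Prop := out = part2_alt i dataset
instance (i : Int) (dataset : List Int) (out : Int × Int) : Decidable (Spec_part2 i dataset out) := by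
  unfold Spec_part2; infer_instance

-- ===== CLAIM (what is proved, stated in full; the proofs are below) =====
def Claim_equal_part2 : Prop := ∀ (i : Int) (dataset : List Int), Dom_part2 i dataset → Pre_part2 i dataset → Spec_part2 i dataset (part2 i dataset)

-- ===== LEMMAS AND PROOFS =====

def okChildren (dataset : List Int) (f : Nat) : Nat → Int → Option (Int × Nat) :=
  okChildrenAux (okNode dataset f)

-- `deliver j v s`: hand value v (cursor j) to the stack s, popping every frame this completes.
def deliver (dataset : List Int) : Int → Int → List PvFrame → (Int × List PvFrame) ⊕ (Int × Int)
  | j, v, [] => Sum.inr (j, v)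
  | j, v, g :: rs =>
    let g' : PvFrame := ⟨g.count, g.mta, g.remaining - 1, g.nodes ++ [v]⟩
    if g'.remaining = 0 then
      let p := metaFoldB dataset g'.count g'.nodes g'.mta j
      deliver dataset p.1 p.2 rs
    else Sum.inl (j, g' :: rs)

def dcont (dataset : List Int) (m : Nat) (p : Int × Int) (s : List PvFrame) : Int × Int :=
  match deliver dataset p.1 p.2 s with
  | Sum.inr a => a
  | Sum.inl q => runB dataset m q.1 q.2

def resume (dataset : List Int) (m : Nat) (i : Int) (s : List PvFrame) : Int × Int :=
  match popLoop dataset i s with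
  | Sum.inr a => a
  | Sum.inl q => runB dataset m q.1 q.2

theorem popLoop_zero (dataset : List Int) (s : List PvFrame) :
    ∀ (i c μ : Int) (nds : List Int),
      popLoop dataset i (⟨c, μ, 0, nds⟩ :: s) =
        deliver dataset (metaFoldB dataset c nds μ i).1 (metaFoldB dataset c nds μ i).2 s := by
  induction s with
  | nil => intro i c μ nds; simp [popLoop, deliver]
  | cons g rs ih =>
    intro i c μ nds
    rw [popLoop]
    simp only [deliver]
    by_cases h : g.remaining - 1 = 0
    · simp only [h]
      exact ih _ _ _ _
    · simp [popLoop, h]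

theorem resume_zero (dataset : List Int) (m : Nat) (i c μ : Int) (nds : List Int) (s : List PvFrame) :
    resume dataset m i (⟨c, μ, 0, nds⟩ :: s) = dcont dataset m (metaFoldB dataset c nds μ i) s := by
  unfold resume dcont
  rw [popLoop_zero]

theorem dcont_cons (dataset : List Int) (m : Nat) (p : Int × Int) (g : PvFrame) (rs : List PvFrame) :
    dcont dataset m p (g :: rs) =
      resume dataset m p.1 (⟨g.count, g.mta, g.remaining - 1, g.nodes ++ [p.2]⟩ :: rs) := by
  unfold dcont resume
  simp only [deliver]
  by_cases h : g.remaining - 1 = 0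
  · simp [h, popLoop_zero]
  · rw [popLoop]
    simp [h]

theorem runB_succ (dataset : List Int) (m : Nat) (i : Int) (s : List PvFrame) :
    runB dataset (m + 1) i s =
      resume dataset m (i + 2) (⟨pvGetD dataset i, pvGetD dataset (i + 1), (pvGetD dataset i).toNat, []⟩ :: s) := by
  rw [runB]; unfold resume
  rcases popLoop dataset (i + 2) (⟨pvGetD dataset i, pvGetD dataset (i + 1), (pvGetD dataset i).toNat, []⟩ :: s) with q | a <;> rfl

-- the single step both metadata loops perform
def mstep (dataset : List Int) (count : Int) (nodes : List Int) (s : Int × Int) : Int × Int :=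
  let d := pvGetD dataset s.1
  let r :=
    if count == 0 then s.2 + d
    else if (nodes.length : Int) > d - 1 ∧ pvGetD dataset 1 - 1 ≥ 0 then
      s.2 + pvGetD nodes (d - 1)
    else s.2
  (s.1 + 1, r)

theorem metaLoopA_eq_fold (dataset : List Int) (count : Int) (nodes : List Int) :
    ∀ (l : List Nat) (i r : Int),
      l.foldl (fun (s : Int × Int) _ => mstep dataset count nodes s) (i, r) =
        metaLoopA dataset count nodes l.length i r := by
  intro l
  induction l with
  | nil => intro i r; rfl
  | cons x xs ih =>
    intro i r
    simp only [List.foldl_cons, List.length_cons]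
    rw [metaLoopA]
    exact ih _ _

theorem metaFoldB_eq (dataset : List Int) (count : Int) (nodes : List Int) (mta i : Int) :
    metaFoldB dataset count nodes mta i = metaLoopA dataset count nodes mta.toNat i 0 := by
  unfold metaFoldB
  have h := metaLoopA_eq_fold dataset count nodes (List.range mta.toNat) i 0
  simpa [mstep, List.length_range] using h

theorem metaLoopA_fst (dataset : List Int) (count : Int) (nodes : List Int) :
    ∀ (m : Nat) (i r : Int), (metaLoopA dataset count nodes m i r).1 = i + m := by
  intro m
  induction m with
  | zero => intro i r; simp [metaLoopA]
  | succ k ih =>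
    intro i r
    rw [metaLoopA]
    rw [ih]
    push_cast
    ring

-- simulation of a run of children frames: with IH for nodes at fuel f, the machine starting at a
-- frame with c children left behaves like A's child loop followed by the frame's metadata fold.
theorem childSim (dataset : List Int) (f : Nat)
    (Hnode : ∀ (i j : Int) (sz : Nat), okNode dataset f i = some (j, sz) →
      (part2Fuel dataset f i).1 = j ∧
      ∀ (s : List PvFrame) (m : Nat), sz ≤ m →
        runB dataset m i s = dcont dataset (m - sz) (part2Fuel dataset f i) s) :
    ∀ (c : Nat) (i2 j2 : Int) (szc : Nat), okChildren dataset f c i2 = some (j2, szc) →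
      ∀ (count mta : Int) (acc : List Int) (s : List PvFrame) (m : Nat), szc ≤ m →
        (childLoopA dataset f c i2 acc).1 = j2 ∧
        resume dataset m i2 (⟨count, mta, c, acc⟩ :: s) =
          dcont dataset (m - szc) (metaFoldB dataset count (childLoopA dataset f c i2 acc).2 mta j2) s := by
  intro c
  induction c with
  | zero =>
    intro i2 j2 szc hok count mta acc s m hm
    rw [okChildren, okChildrenAux] at hok
    simp only [Option.some.injEq, Prod.mk.injEq] at hok
    obtain ⟨rfl, rfl⟩ := hok
    constructor
    · simp [childLoopA]
    · rw [resume_zero]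
      simp [childLoopA]
  | succ c ih =>
    intro i2 j2 szc hok count mta acc s m hm
    rw [okChildren, okChildrenAux] at hok
    rcases h1 : okNode dataset f i2 with _ | ⟨j1, sz1⟩
    · rw [h1] at hok; simp at hok
    rw [h1] at hok
    simp only [Option.bind] at hok
    rw [show okChildrenAux (okNode dataset f) = okChildren dataset f from rfl] at hok
    rcases h2 : okChildren dataset f c j1 with _ | ⟨j2', szc'⟩
    · rw [h2] at hok; simp at hok
    rw [h2] at hok
    simp only [Option.some.injEq, Prod.mk.injEq] at hok
    obtain ⟨rfl, rfl⟩ := hok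
    obtain ⟨hfst, hrun⟩ := Hnode i2 j1 sz1 h1
    have hsz1m : sz1 ≤ m := by omega
    have hcl : childLoopA dataset f (c + 1) i2 acc =
        childLoopA dataset f c j1 (acc ++ [(part2Fuel dataset f i2).2]) := by
      rw [childLoopA, hfst]
    have hres : resume dataset m i2 (⟨count, mta, c + 1, acc⟩ :: s) =
        runB dataset m i2 (⟨count, mta, c + 1, acc⟩ :: s) := by
      unfold resume
      rw [popLoop]
      simp
    rw [hres, hrun _ m hsz1m, dcont_cons]
    have ihr := ih j1 j2' szc' h2 count mta
      (acc ++ [(part2Fuel dataset f i2).2]) s (m - sz1) (by omega)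
    simp only [hfst] at *
    obtain ⟨ih1, ih2⟩ := ihr
    constructor
    · rw [hcl]; exact ih1
    · have hfr : (⟨count, mta, c + 1 - 1, acc ++ [(part2Fuel dataset f i2).2]⟩ : PvFrame) =
          ⟨count, mta, c, acc ++ [(part2Fuel dataset f i2).2]⟩ := by simp
      rw [hfr, ih2, hcl]
      congr 1
      omega

-- main simulation: a well-formed node is processed by the machine exactly as by A's recursion.
theorem nodeSim (dataset : List Int) :
    ∀ (f : Nat) (i j : Int) (sz : Nat), okNode dataset f i = some (j, sz) →
      (part2Fuel dataset f i).1 = j ∧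
      ∀ (s : List PvFrame) (m : Nat), sz ≤ m →
        runB dataset m i s = dcont dataset (m - sz) (part2Fuel dataset f i) s := by
  intro f
  induction f with
  | zero => intro i j sz hok; rw [okNode] at hok; simp at hok
  | succ f ih =>
    intro i j sz hok
    rw [okNode] at hok
    rcases hc : PySem.List.pyGet? dataset i with _ | count
    · rw [hc] at hok; simp at hok
    rw [hc] at hok
    rcases hm2 : PySem.List.pyGet? dataset (i + 1) with _ | mta
    · rw [hm2] at hok; simp at hok
    rw [hm2] at hok
    simp only [Option.bind] at hok
    rw [show okChildrenAux (okNode dataset f) = okChildren dataset f from rfl] at hok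
    rcases hch : okChildren dataset f count.toNat (i + 2) with _ | ⟨j2, szc⟩
    · rw [hch] at hok; simp at hok
    rw [hch] at hok
    simp only [Option.bind] at hok
    by_cases hom : okMeta dataset count count.toNat mta.toNat j2 = true
    · rw [if_pos hom] at hok
      simp only [Option.some.injEq, Prod.mk.injEq] at hok
      obtain ⟨rfl, rfl⟩ := hok
      have hgc : pvGetD dataset i = count := by simp [pvGetD, hc]
      have hgm : pvGetD dataset (i + 1) = mta := by simp [pvGetD, hm2]
      have hpf : part2Fuel dataset (f + 1) i =
          metaLoopA dataset count (childLoopA dataset f count.toNat (i + 2) []).2 mta.toNat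
            (childLoopA dataset f count.toNat (i + 2) []).1 0 := by
        rw [part2Fuel, hgc, hgm]
      obtain ⟨cl1, _⟩ := childSim dataset f ih count.toNat (i + 2) j2 szc hch count mta [] [] szc (le_refl _)
      constructor
      · rw [hpf, cl1, metaLoopA_fst]
      · intro s m hm
        obtain ⟨m', rfl⟩ : ∃ m', m = m' + 1 := ⟨m - 1, by omega⟩
        rw [runB_succ, hgc, hgm]
        obtain ⟨c1, c2⟩ := childSim dataset f ih count.toNat (i + 2) j2 szc hch count mta [] s m' (by omega)
        rw [c2, hpf, c1, metaFoldB_eq]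
        congr 1
        omega
    · rw [if_neg hom] at hok; simp at hok

-- ===== VERDICT (by name: the statement is the Claim_ definition above) =====
theorem part2_spec : Claim_equal_part2 := by
  intro i dataset _ hpre
  unfold Spec_part2
  unfold Pre_part2 at hpre
  rcases hok : okNode dataset (dataset.length + 1) i with _ | r
  · rw [hok] at hpre; simp [Option.any] at hpre
  · rw [hok] at hpre
    simp only [Option.any, decide_eq_true_eq] at hpre
    obtain ⟨hfst, hrun⟩ := nodeSim dataset (dataset.length + 1) i r.1 r.2 (by rw [hok])
    unfold part2 part2_alt
    rw [hrun [] (dataset.length + 1) hpre]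
    unfold dcont
    simp [deliver]
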